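-- pv_equiv track=rewrite | github.com/DGabriel-Br/pdf-split-ia | backend/app/routers/corrections.py | _keyword_candidates
-- ===== SOURCE A (Python) =====
-- from collections import Counter, defaultdict
--
-- _STOPWORDS = {
--     "the", "and", "for", "this", "that", "with", "from", "have", "been",
--     "will", "are", "was", "has", "not", "but", "its", "page", "date",
--     "name", "ref", "no", "to", "of", "in", "a", "an",
-- }
--
-- def _keyword_candidates(texts: list[str], n: int = 12) -> list[str]:
--     """Return most frequent non-trivial words across text excerpts."""
--     words: list[str] = []
--     for t in texts:
--         for w in t.lower().split():
--             w = w.strip(".,;:()-/\\\"'")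
--             if len(w) > 4 and w not in _STOPWORDS and w.replace(".", "").isalpha():
--                 words.append(w)
--     return [w for w, _ in Counter(words).most_common(n)]
-- ===== SOURCE B (Python) =====
-- from collections import Counter, defaultdict
--
-- _STOPWORDS = {
--     "the", "and", "for", "this", "that", "with", "from", "have", "been",
--     "will", "are", "was", "has", "not", "but", "its", "page", "date",
--     "name", "ref", "no", "to", "of", "in", "a", "an",
-- }
--
-- def _keyword_candidates(texts: list[str], n: int = 12) -> list[str]:
--     """Return most frequent non-trivial words across text excerpts."""
--     counts: dict[str, int] = {}
--     for t in texts: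
--         for w in t.lower().split():
--             w = w.strip(".,;:()-/\\\"'")
--             if len(w) > 4 and w not in _STOPWORDS and w.replace(".", "").isalpha():
--                 counts[w] = counts.get(w, 0) + 1
--     if n <= 0 or not counts:
--         return []
--     # counting sort by frequency: bucket the words by their count, then walk
--     # the buckets from the highest count down (first-occurrence order inside a
--     # bucket matches the stable tie-breaking of most_common)
--     buckets: dict[int, list[str]] = {}
--     for w, c in counts.items():
--         buckets.setdefault(c, []).append(w)
--     ranked: list[str] = []
--     for c in range(max(buckets), 0, -1):
--         ranked.extend(buckets.get(c, []))
--     return ranked[:n]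
-- ===== Notes on version B (the rewrite author's own statement) =====
-- stated objective: alternative
-- what changed: B replaces A's comparison-based selection (Counter.most_common's heap top-k) by a counting sort: words are bucketed by their frequency and the buckets are walked from the highest count down, sliced to n (empty for n <= 0); no sort or heap is used.
import Mathlib
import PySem

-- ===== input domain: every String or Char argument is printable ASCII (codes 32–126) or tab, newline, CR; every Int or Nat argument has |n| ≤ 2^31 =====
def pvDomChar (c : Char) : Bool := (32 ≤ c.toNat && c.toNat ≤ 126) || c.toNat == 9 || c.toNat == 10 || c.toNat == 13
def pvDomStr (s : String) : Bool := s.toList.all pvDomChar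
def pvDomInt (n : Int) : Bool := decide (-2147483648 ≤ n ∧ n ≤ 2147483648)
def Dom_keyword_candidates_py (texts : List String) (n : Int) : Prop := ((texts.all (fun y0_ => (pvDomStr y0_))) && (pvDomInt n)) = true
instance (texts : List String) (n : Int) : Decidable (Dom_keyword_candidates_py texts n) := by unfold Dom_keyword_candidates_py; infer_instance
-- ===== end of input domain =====

-- B replaces A's comparison-based top-n selection (Counter.most_common) by a counting sort:
-- words are bucketed by frequency and the buckets are walked from the highest count down
-- (objective: alternative).

-- helpers shared verbatim by both Python sources (the token filter is the same line in A and B)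
def pvStopwords : List String :=
  ["the", "and", "for", "this", "that", "with", "from", "have", "been",
   "will", "are", "was", "has", "not", "but", "its", "page", "date",
   "name", "ref", "no", "to", "of", "in", "a", "an"]

def pvClean (w : String) : String := PySem.Str.stripChars w ".,;:()-/\\\"'"

def pvKeep (w : String) : Bool :=
  decide (4 < PySem.Str.len w) && !(decide (w ∈ pvStopwords)) &&
    PySem.Str.strIsalpha (PySem.Str.replace w "." "")

-- ===== PORT A =====
-- Counter(words).most_common(n) = stable reverse sort of the items by count, first n (n ≤ 0 → [])
def keyword_candidates_py (texts : List String) (n : Int) : List String :=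
  let words : List String :=
    texts.foldl (fun acc t =>
      (PySem.Str.split₀ (PySem.Str.lower t)).foldl (fun acc w =>
        let c := pvClean w
        if pvKeep c then acc ++ [c] else acc) acc) []
  ((PySem.List.sorted (PySem.Dict.counter words).items (fun kv => kv.2) true).take n.toNat).map
    (fun kv => kv.1)

-- ===== PORT B =====
def keyword_candidates_py_alt (texts : List String) (n : Int) : List String :=
  let counts : PySem.Dict String Int :=
    texts.foldl (fun d t =>
      (PySem.Str.split₀ (PySem.Str.lower t)).foldl (fun d w =>
        let c := pvClean w
        if pvKeep c then d.insert c (d.getD c 0 + 1) else d) d) PySem.Dict.empty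
  if n ≤ 0 ∨ counts.items = [] then []
  else
    let buckets : PySem.Dict Int (List String) :=
      counts.items.foldl (fun d kv => d.modify kv.2 [] (fun l => l ++ [kv.1])) PySem.Dict.empty
    match PySem.List.max? buckets.keys (fun c => c) with
    | none => []   -- unreachable: counts is nonempty here, so buckets has a key (Python's max would raise only on an empty dict)
    | some m =>
      let ranked : List String :=
        (PySem.List.pyRange m 0 (-1)).foldl (fun acc c => acc ++ buckets.getD c []) []
      PySem.List.slice ranked none (some n)

-- ===== PRECONDITION & SPEC =====
def Spec_keyword_candidates_py (texts : List String) (n : Int) (out : List String) : Prop := out = keyword_candidates_py_alt texts n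
instance (texts : List String) (n : Int) (out : List String) : Decidable (Spec_keyword_candidates_py texts n out) := by unfold Spec_keyword_candidates_py; infer_instance

-- ===== CLAIM (what is proved, stated in full; the proofs are below) =====
def Claim_equal_keyword_candidates_py : Prop := ∀ (texts : List String) (n : Int), Dom_keyword_candidates_py texts n → Spec_keyword_candidates_py texts n (keyword_candidates_py texts n)

-- ===== LEMMAS AND PROOFS =====

-- the tokens one text contributes, after lowering / splitting / stripping / filtering
def pvTok (t : String) : List String :=
  ((PySem.Str.split₀ (PySem.Str.lower t)).filter (fun w => pvKeep (pvClean w))).map pvClean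

-- A's word-collecting loop produces the flattened token lists
theorem pvWordsA (texts : List String) (acc : List String) :
    texts.foldl (fun acc t =>
      (PySem.Str.split₀ (PySem.Str.lower t)).foldl (fun acc w =>
        let c := pvClean w
        if pvKeep c then acc ++ [c] else acc) acc) acc
    = acc ++ texts.flatMap pvTok := by
  have houter : (fun (acc : List String) (t : String) =>
      (PySem.Str.split₀ (PySem.Str.lower t)).foldl (fun acc w =>
        let c := pvClean w
        if pvKeep c then acc ++ [c] else acc) acc)
      = fun acc t => acc ++ pvTok t := by
    funext acc t
    simpa [pvTok] using
      PySem.List.foldl_append_if (fun w => pvKeep (pvClean w)) pvClean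
        (PySem.Str.split₀ (PySem.Str.lower t)) acc
  rw [houter, PySem.List.foldl_append_eq_flatMap]

-- B's counting loop is the counting fold over the flattened token lists
theorem pvCountsB (texts : List String) (d : PySem.Dict String Int) :
    texts.foldl (fun d t =>
      (PySem.Str.split₀ (PySem.Str.lower t)).foldl (fun d w =>
        let c := pvClean w
        if pvKeep c then d.insert c (d.getD c 0 + 1) else d) d) d
    = (texts.flatMap pvTok).foldl (fun d x => d.insert x (d.getD x 0 + 1)) d := by
  induction texts generalizing d with
  | nil => simp
  | cons t ts ih =>
    have hinner : ∀ (d : PySem.Dict String Int),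
        (PySem.Str.split₀ (PySem.Str.lower t)).foldl (fun d w =>
          let c := pvClean w
          if pvKeep c then d.insert c (d.getD c 0 + 1) else d) d
        = (pvTok t).foldl (fun d x => d.insert x (d.getD x 0 + 1)) d := by
      intro d
      show (PySem.Str.split₀ (PySem.Str.lower t)).foldl
          (fun (d : PySem.Dict String Int) w =>
            if pvKeep (pvClean w) then d.insert (pvClean w) (d.getD (pvClean w) 0 + 1) else d) d
        = _
      rw [PySem.List.foldl_if_eq_foldl_filter (fun w => pvKeep (pvClean w))
        (fun (d : PySem.Dict String Int) w => d.insert (pvClean w) (d.getD (pvClean w) 0 + 1))]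
      rw [pvTok, List.foldl_map]
    simp only [List.foldl_cons, List.flatMap_cons, List.foldl_append, hinner, ih]

-- inserting x into a partitioned list: x passes every element it does not go before
theorem pvInsertBy_append {α : Type} (before : α → α → Bool) (x : α) (pre suf : List α)
    (h : ∀ y ∈ pre, before x y = false) :
    PySem.List.insertBy before x (pre ++ suf) = pre ++ PySem.List.insertBy before x suf := by
  induction pre with
  | nil => simp
  | cons p ps ih =>
    have hp : before x p = false := h p (by simp)
    simp [PySem.List.insertBy, hp, ih (fun y hy => h y (by simp [hy]))]

-- inserting x before a block it goes entirely before
theorem pvInsertBy_all {α : Type} (before : α → α → Bool) (x : α) (ys : List α)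
    (h : ∀ y ∈ ys, before x y = true) :
    PySem.List.insertBy before x ys = x :: ys := by
  cases ys with
  | nil => simp [PySem.List.insertBy]
  | cons y ys => simp [PySem.List.insertBy, h y (by simp)]

-- THE STABILITY LEMMA: the stable descending sort by key is the concatenation of the
-- key-fibers of xs taken in any strictly descending enumeration cs of (a superset of) the keys
theorem pvFibersAux (cs : List Int) (hp : cs.Pairwise (· > ·)) :
    ∀ (xs : List (String × Int)), (∀ kv ∈ xs, kv.2 ∈ cs) →
    xs.foldl (fun acc x => PySem.List.insertBy (fun a b => decide (b.2 < a.2)) x acc) []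
      = cs.flatMap (fun c => xs.filter (fun kv => kv.2 == c)) := by
  intro xs
  induction xs using List.reverseRecOn with
  | nil => simp
  | append_singleton xs x ih =>
    intro hm
    have hxs : ∀ kv ∈ xs, kv.2 ∈ cs := fun kv h => hm kv (by simp [h])
    have hx : x.2 ∈ cs := hm x (by simp)
    rw [List.foldl_append, List.foldl_cons, List.foldl_nil, ih hxs]
    obtain ⟨cs1, cs2, rfl⟩ := List.append_of_mem hx
    have h1 : ∀ c ∈ cs1, x.2 < c := by
      intro c hc
      exact (List.pairwise_append.mp hp).2.2 c hc x.2 (by simp)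
    have h2 : ∀ c ∈ cs2, c < x.2 := by
      intro c hc
      exact (List.pairwise_cons.mp (List.pairwise_append.mp hp).2.1).1 c hc
    -- the new element only changes its own fiber
    have e1 : ∀ c ∈ cs1, ((xs ++ [x]).filter (fun kv => kv.2 == c))
        = xs.filter (fun kv => kv.2 == c) := by
      intro c hc
      rw [List.filter_append]
      have : (x.2 == c) = false := by simpa using (ne_of_lt (h1 c hc))
      simp [List.filter, this]
    have e2 : ∀ c ∈ cs2, ((xs ++ [x]).filter (fun kv => kv.2 == c))
        = xs.filter (fun kv => kv.2 == c) := by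
      intro c hc
      rw [List.filter_append]
      have : (x.2 == c) = false := by simpa using (ne_of_gt (h2 c hc))
      simp [List.filter, this]
    have emid : ((xs ++ [x]).filter (fun kv => kv.2 == x.2))
        = xs.filter (fun kv => kv.2 == x.2) ++ [x] := by
      rw [List.filter_append]; simp [List.filter]
    rw [List.flatMap_append, List.flatMap_append, List.flatMap_cons, List.flatMap_cons,
      List.flatMap_congr (h := e1), List.flatMap_congr (h := e2), emid]
    have hpre : ∀ y ∈ cs1.flatMap (fun c => xs.filter (fun kv => kv.2 == c))
          ++ xs.filter (fun kv => kv.2 == x.2), (decide (y.2 < x.2)) = false := by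
      intro y hy
      rcases List.mem_append.mp hy with hy | hy
      · obtain ⟨c, hc, hyf⟩ := List.mem_flatMap.mp hy
        have : y.2 = c := by simpa using (List.mem_filter.mp hyf).2
        simp only [decide_eq_false_iff_not, not_lt, this]
        exact le_of_lt (h1 c hc)
      · have : y.2 = x.2 := by simpa using (List.mem_filter.mp hy).2
        simp [this]
    have hsuf : ∀ y ∈ cs2.flatMap (fun c => xs.filter (fun kv => kv.2 == c)),
        (decide (y.2 < x.2)) = true := by
      intro y hy
      obtain ⟨c, hc, hyf⟩ := List.mem_flatMap.mp hy
      have : y.2 = c := by simpa using (List.mem_filter.mp hyf).2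
      simp only [decide_eq_true_eq, this]
      exact h2 c hc
    calc PySem.List.insertBy (fun a b => decide (b.2 < a.2)) x
          (cs1.flatMap (fun c => xs.filter (fun kv => kv.2 == c))
            ++ (xs.filter (fun kv => kv.2 == x.2)
            ++ cs2.flatMap (fun c => xs.filter (fun kv => kv.2 == c))))
        = (cs1.flatMap (fun c => xs.filter (fun kv => kv.2 == c))
            ++ xs.filter (fun kv => kv.2 == x.2))
            ++ PySem.List.insertBy (fun a b => decide (b.2 < a.2)) x
              (cs2.flatMap (fun c => xs.filter (fun kv => kv.2 == c))) := by
          rw [← List.append_assoc]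
          exact pvInsertBy_append _ x _ _ hpre
      _ = _ := by
          rw [pvInsertBy_all _ x _ hsuf]
          simp

theorem pvFibers (xs : List (String × Int)) (cs : List Int)
    (hp : cs.Pairwise (· > ·)) (hm : ∀ kv ∈ xs, kv.2 ∈ cs) :
    PySem.List.sorted xs (fun kv => kv.2) true
      = cs.flatMap (fun c => xs.filter (fun kv => kv.2 == c)) := by
  rw [PySem.List.sorted_rev_eq_foldl_insertBy]
  exact pvFibersAux cs hp xs hm

-- ===== VERDICT (by name: the statement is the Claim_ definition above) =====
-- the bucket dict groups: bucket c is the c-count fiber of the items, in order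
theorem pvBucketD (items : List (String × Int)) (c : Int) :
    (items.foldl (fun d kv => d.modify kv.2 [] (fun l => l ++ [kv.1]))
      (PySem.Dict.empty : PySem.Dict Int (List String))).getD c []
      = (items.filter (fun kv => kv.2 == c)).map (fun kv => kv.1) := by
  have h : items.foldl (fun d kv => d.modify kv.2 [] (fun l => l ++ [kv.1]))
        (PySem.Dict.empty : PySem.Dict Int (List String))
      = (items.map Prod.swap).foldl (fun d p => d.modify p.1 [] (fun l => l ++ [p.2]))
        PySem.Dict.empty := by
    rw [List.foldl_map]
    simp
  rw [h, PySem.Dict.getD_foldl_modify_append, List.filter_map, List.map_map]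
  simp [Function.comp_def, Prod.swap]

theorem keyword_candidates_py_spec : Claim_equal_keyword_candidates_py := by
  intro texts n _
  unfold Spec_keyword_candidates_py
  have hA : keyword_candidates_py texts n
      = ((PySem.List.sorted (PySem.Dict.counter (texts.flatMap pvTok)).items
          (fun kv => kv.2) true).take n.toNat).map (fun kv => kv.1) := by
    unfold keyword_candidates_py
    rw [pvWordsA, List.nil_append]
  have hB : keyword_candidates_py_alt texts n
      = (if n ≤ 0 ∨ (PySem.Dict.counter (texts.flatMap pvTok)).items = [] then []
        else
          match PySem.List.max? ((PySem.Dict.counter (texts.flatMap pvTok)).items.foldl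
              (fun d kv => d.modify kv.2 [] (fun l => l ++ [kv.1]))
              (PySem.Dict.empty : PySem.Dict Int (List String))).keys (fun c => c) with
          | none => []
          | some m =>
            PySem.List.slice
              ((PySem.List.pyRange m 0 (-1)).foldl (fun acc c => acc ++
                ((PySem.Dict.counter (texts.flatMap pvTok)).items.foldl
                  (fun d kv => d.modify kv.2 [] (fun l => l ++ [kv.1]))
                  (PySem.Dict.empty : PySem.Dict Int (List String))).getD c []) [])
              none (some n)) := by
    unfold keyword_candidates_py_alt
    rw [pvCountsB, PySem.Dict.foldl_insert_getD_add_one_eq_counter]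
  rw [hA, hB]
  set toks := texts.flatMap pvTok with htoks
  set items := (PySem.Dict.counter toks).items with hitems
  by_cases hc : n ≤ 0 ∨ items = []
  · rw [if_pos hc]
    rcases hc with hc | hc
    · simp [Int.toNat_of_nonpos hc]
    · rw [hc, (PySem.List.sorted_eq_nil_iff _ _ _).mpr rfl]
      simp
  · rw [if_neg hc]
    rw [not_or] at hc
    obtain ⟨hn', hne⟩ := hc
    have hn : 0 < n := lt_of_not_ge (fun h => hn' (by omega))
    set buckets : PySem.Dict Int (List String) :=
      items.foldl (fun d kv => d.modify kv.2 [] (fun l => l ++ [kv.1])) PySem.Dict.empty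
      with hbuckets
    have hkeys : buckets.keys = PySem.Set.ofList (items.map (fun kv => kv.2)) := by
      rw [hbuckets, PySem.Dict.keys_foldl_modify_key]
      simp [PySem.Set.update_nil_left]
    -- buckets is nonempty, so max() returns its largest key m
    have hkne : buckets.keys ≠ [] := by
      rw [hkeys]
      obtain ⟨kv, hkv⟩ := List.exists_mem_of_ne_nil items hne
      have : kv.2 ∈ PySem.Set.ofList (items.map (fun kv => kv.2)) :=
        (PySem.Set.mem_ofList _ _).mpr (List.mem_map_of_mem hkv)
      exact List.ne_nil_of_mem this
    obtain ⟨m, hmax⟩ : ∃ m, PySem.List.max? buckets.keys (fun c => c) = some m := by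
      rcases h : PySem.List.max? buckets.keys (fun c => c) with _ | m
      · exact absurd ((PySem.List.max?_eq_none_iff _ _).mp h) hkne
      · exact ⟨m, rfl⟩
    rw [hmax]
    -- the match on `some m` reduces definitionally
    show _ = PySem.List.slice
      ((PySem.List.pyRange m 0 (-1)).foldl (fun acc c => acc ++ buckets.getD c []) []) none (some n)
    -- every item's count lies in the countdown range m, m-1, …, 1
    have hmem : ∀ kv ∈ items, kv.2 ∈ PySem.List.pyRange m 0 (-1) := by
      intro kv hkv
      rw [PySem.List.mem_pyRange_neg_one]
      constructor
      · -- counts are positive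
        rw [hitems, PySem.Dict.items_counter] at hkv
        obtain ⟨k, hk, rfl⟩ := List.mem_map.mp hkv
        have hk' : k ∈ toks := (PySem.Set.mem_ofList _ _).mp hk
        show (0 : Int) < ((toks.count k : Nat) : Int)
        exact_mod_cast List.count_pos_iff.mpr hk'
      · -- counts are bounded by the largest bucket key
        have : kv.2 ∈ buckets.keys := by
          rw [hkeys]
          exact (PySem.Set.mem_ofList _ _).mpr (List.mem_map_of_mem hkv)
        exact PySem.List.max?_isMax hmax kv.2 this
    have hpw : (PySem.List.pyRange m 0 (-1)).Pairwise (· > ·) := by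
      rw [PySem.List.pyRange_neg_one_eq_reverse]
      exact List.pairwise_reverse.mpr (PySem.List.pairwise_lt_pyRange_one 1 (m + 1))
    rw [PySem.List.foldl_append_eq_flatMap, List.nil_append]
    have hfib : (fun c => buckets.getD c [])
        = fun c => (items.filter (fun kv => kv.2 == c)).map (fun kv => kv.1) :=
      funext (fun c => pvBucketD items c)
    rw [hfib, ← List.map_flatMap, ← pvFibers items (PySem.List.pyRange m 0 (-1)) hpw hmem]
    have hslice : ∀ (xs : List String),
        PySem.List.slice xs none (some n) = xs.take n.toNat := by
      intro xs
      have hcast : n = ((n.toNat : Nat) : Int) := (Int.toNat_of_nonneg (le_of_lt hn)).symm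
      rw [hcast, PySem.List.slice_to_natCast]
      simp
      omega
    rw [hslice, List.map_take]
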